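-- pv_equiv track=rewrite | github.com/maxpoletto/laforesta | pdg-2026/pdg/ceduo.py | _has_adjacency_conflict
-- ===== SOURCE A (Python) =====
-- MIN_ADJACENCY_GAP = 2      # Minimum years between adjacent parcel events
--
-- ParcelKey = tuple[str, str]  # (compresa, particella)
--
-- Adjacencies = set[tuple[ParcelKey, ParcelKey]]  # sorted pairs: first < second
--
-- def _has_adjacency_conflict(key: ParcelKey, year: int,
--                             adjacencies: Adjacencies,
--                             scheduled_years: dict[ParcelKey, list[int]]) -> bool:
--     """Check if scheduling key in year conflicts with any adjacent parcel."""
--     for a, b in adjacencies: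
--         if a == key:
--             other = b
--         elif b == key:
--             other = a
--         else:
--             continue
--         for adj_year in scheduled_years.get(other, []):
--             if abs(year - adj_year) < MIN_ADJACENCY_GAP:
--                 return True
--     return False
-- ===== SOURCE B (Python) =====
-- MIN_ADJACENCY_GAP = 2
--
--
-- def _has_adjacency_conflict(key, year, adjacencies, scheduled_years):
--     # Reversed traversal: walk the schedule, not the adjacency set.
--     for other, years in scheduled_years.items():
--         if ((key, other) in adjacencies or (other, key) in adjacencies) \
--                 and any(abs(year - y) < MIN_ADJACENCY_GAP for y in years):
--             return True
--     return False
-- ===== Notes on version B (the rewrite author's own statement) =====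
-- stated objective: alternative
-- what changed: B reverses the traversal: instead of scanning the adjacency set and looking each partner up in the schedule dict, it iterates the schedule dict's entries and tests adjacency of each scheduled parcel by set membership of (key, other) / (other, key).
import Mathlib
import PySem

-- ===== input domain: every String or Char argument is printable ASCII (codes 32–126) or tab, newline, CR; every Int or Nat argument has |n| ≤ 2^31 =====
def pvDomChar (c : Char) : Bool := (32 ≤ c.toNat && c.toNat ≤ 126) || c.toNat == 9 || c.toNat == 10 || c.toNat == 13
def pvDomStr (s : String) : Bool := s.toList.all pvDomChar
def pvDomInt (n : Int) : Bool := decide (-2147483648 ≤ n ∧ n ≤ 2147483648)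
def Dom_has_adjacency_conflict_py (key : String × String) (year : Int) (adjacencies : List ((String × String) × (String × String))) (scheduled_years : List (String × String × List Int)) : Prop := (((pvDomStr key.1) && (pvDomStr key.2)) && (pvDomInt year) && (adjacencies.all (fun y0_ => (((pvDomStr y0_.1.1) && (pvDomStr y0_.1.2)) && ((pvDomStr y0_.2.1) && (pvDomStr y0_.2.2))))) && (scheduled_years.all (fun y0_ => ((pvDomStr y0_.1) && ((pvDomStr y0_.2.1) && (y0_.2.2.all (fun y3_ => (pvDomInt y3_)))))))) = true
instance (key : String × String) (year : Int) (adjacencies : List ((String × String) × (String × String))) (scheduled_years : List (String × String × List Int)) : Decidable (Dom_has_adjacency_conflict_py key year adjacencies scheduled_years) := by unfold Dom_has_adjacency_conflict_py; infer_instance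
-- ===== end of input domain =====

-- B reverses the traversal (schedule-dict pass with adjacency membership tests instead of an adjacency pass with dict lookups); equal return values proved on dicts with distinct keys.


-- ===== PORT A =====
-- scheduled_years.get(other, []) on the association list (first match, exact)
def schedGet (d : List (String × String × List Int)) (k : String × String) : List Int :=
  match d with
  | [] => []
  | (a, b, ys) :: rest => if (a, b) == k then ys else schedGet rest k

-- literal port of A: one pass over adjacencies, inner scan of the found neighbor's schedule, early return = any
def has_adjacency_conflict_py (key : String × String) (year : Int) (adjacencies : List ((String × String) × (String × String))) (scheduled_years : List (String × String × List Int)) : Bool :=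
  adjacencies.any (fun ab =>
    if ab.1 == key then
      (schedGet scheduled_years ab.2).any (fun adj_year => decide (|year - adj_year| < 2))
    else if ab.2 == key then
      (schedGet scheduled_years ab.1).any (fun adj_year => decide (|year - adj_year| < 2))
    else false)

-- ===== PORT B =====
-- port of B: iterate the schedule dict's entries; adjacency is decided by set membership
def has_adjacency_conflict_py_alt (key : String × String) (year : Int) (adjacencies : List ((String × String) × (String × String))) (scheduled_years : List (String × String × List Int)) : Bool :=
  scheduled_years.any (fun e =>
    (PySem.Set.contains adjacencies (key, (e.1, e.2.1)) ||
     PySem.Set.contains adjacencies ((e.1, e.2.1), key))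
    && e.2.2.any (fun y => decide (|year - y| < 2)))

-- ===== PRECONDITION & SPEC =====
-- Pre_ requires the schedule association list to have pairwise-distinct keys: a list with a
-- duplicated key represents no Python dict (Python A's argument is a dict, which cannot repeat
-- keys), so no input A accepts is excluded.
def Pre_has_adjacency_conflict_py (key : String × String) (year : Int) (adjacencies : List ((String × String) × (String × String))) (scheduled_years : List (String × String × List Int)) : Prop :=
  (scheduled_years.map (fun e => (e.1, e.2.1))).Nodup
instance (key : String × String) (year : Int) (adjacencies : List ((String × String) × (String × String))) (scheduled_years : List (String × String × List Int)) : Decidable (Pre_has_adjacency_conflict_py key year adjacencies scheduled_years) := by unfold Pre_has_adjacency_conflict_py; infer_instance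

def pvWitness_has_adjacency_conflict_py : (String × String) × Int × (List ((String × String) × (String × String))) × (List (String × String × List Int)) :=
  (("a", "1"), 2020, [(("a", "1"), ("b", "2"))], [("b", "2", [2021]), ("c", "3", [2018])])

def Spec_has_adjacency_conflict_py (key : String × String) (year : Int) (adjacencies : List ((String × String) × (String × String))) (scheduled_years : List (String × String × List Int)) (out : Bool) : Prop := out = has_adjacency_conflict_py_alt key year adjacencies scheduled_years
instance (key : String × String) (year : Int) (adjacencies : List ((String × String) × (String × String))) (scheduled_years : List (String × String × List Int)) (out : Bool) : Decidable (Spec_has_adjacency_conflict_py key year adjacencies scheduled_years out) := by unfold Spec_has_adjacency_conflict_py; infer_instance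

-- ===== CLAIM (what is proved, stated in full; the proofs are below) =====
def Claim_equal_has_adjacency_conflict_py : Prop := ∀ (key : String × String) (year : Int) (adjacencies : List ((String × String) × (String × String))) (scheduled_years : List (String × String × List Int)), Dom_has_adjacency_conflict_py key year adjacencies scheduled_years → Pre_has_adjacency_conflict_py key year adjacencies scheduled_years → Spec_has_adjacency_conflict_py key year adjacencies scheduled_years (has_adjacency_conflict_py key year adjacencies scheduled_years)

-- ===== LEMMAS AND PROOFS =====

-- under distinct keys, scanning the looked-up schedule equals scanning every entry filtered to that key
theorem schedGet_any (c : Int → Bool) (x : String × String) :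
    ∀ d : List (String × String × List Int),
      (d.map (fun e => (e.1, e.2.1))).Nodup →
      (schedGet d x).any c = d.any (fun e => ((e.1, e.2.1) == x) && e.2.2.any c) := by
  intro d
  induction d with
  | nil => intro _; rfl
  | cons e rest ih =>
    intro hnd
    obtain ⟨e1, e2, ys⟩ := e
    simp only [List.map_cons, List.nodup_cons] at hnd
    simp only [schedGet, List.any_cons]
    by_cases h : ((e1, e2) == x) = true
    · rw [if_pos h]
      have hx : (e1, e2) = x := eq_of_beq h
      by_cases hy : ys.any c = true
      · simp [h, hy]
      · have hrest : rest.any (fun e => ((e.1, e.2.1) == x) && e.2.2.any c) = false := by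
          rw [List.any_eq_false]
          intro a ha
          have : (a.1, a.2.1) ≠ x := by
            intro hax
            exact hnd.1 (by rw [hx, ← hax]; exact List.mem_map.mpr ⟨a, ha, rfl⟩)
          simp [this]
        simp [h, Bool.eq_false_iff.mpr hy, hrest]
    · rw [if_neg h, ih hnd.2]
      simp [h]

theorem has_adjacency_conflict_py_spec : Claim_equal_has_adjacency_conflict_py := by
  intro key year adjacencies scheduled_years _ hpre
  unfold Spec_has_adjacency_conflict_py has_adjacency_conflict_py has_adjacency_conflict_py_alt
  -- turn A's if-chain into symmetric disjunction form
  have hcong : ∀ ab : (String × String) × (String × String),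
      (if ab.1 == key then
        (schedGet scheduled_years ab.2).any (fun adj_year => decide (|year - adj_year| < 2))
      else if ab.2 == key then
        (schedGet scheduled_years ab.1).any (fun adj_year => decide (|year - adj_year| < 2))
      else false)
      = (((ab.1 == key) && (schedGet scheduled_years ab.2).any (fun adj_year => decide (|year - adj_year| < 2)))
         || ((ab.2 == key) && (schedGet scheduled_years ab.1).any (fun adj_year => decide (|year - adj_year| < 2)))) := by
    intro ab
    by_cases h1 : ab.1 = key
    · by_cases h2 : ab.2 = key
      · simp [h1, h2]
      · apply Bool.coe_iff_coe.mp
        simp [beq_iff_eq, h1, h2]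
    · apply Bool.coe_iff_coe.mp
      simp [beq_iff_eq, h1]
  rw [List.any_congr rfl hcong]
  -- both sides ↔ the same existential
  apply Bool.coe_iff_coe.mp
  simp only [List.any_eq_true, Bool.or_eq_true, Bool.and_eq_true, beq_iff_eq,
    PySem.Set.contains, List.contains_eq_mem, decide_eq_true_eq,
    schedGet_any (fun y => decide (|year - y| < 2)) _ scheduled_years hpre]
  constructor
  · rintro ⟨ab, hab, ⟨h1, e, he, hk, hy⟩ | ⟨h2, e, he, hk, hy⟩⟩
    · exact ⟨e, he, Or.inl (by rw [hk, ← h1]; exact hab), hy⟩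
    · exact ⟨e, he, Or.inr (by rw [hk, ← h2]; exact hab), hy⟩
  · rintro ⟨e, he, h | h, hy⟩
    · exact ⟨(key, (e.1, e.2.1)), h, Or.inl ⟨rfl, e, he, rfl, hy⟩⟩
    · exact ⟨((e.1, e.2.1), key), h, Or.inr ⟨rfl, e, he, rfl, hy⟩⟩
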